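-- pv_equiv track=rewrite | github.com/IvarsKarpics/edna2 | edna2/tasks/ControlIndexing.py | getListPermutation
-- ===== SOURCE A (Python) =====
-- import itertools
--
-- def getListPermutation(listDozorSpotFile):
--     listPermutation = []
--     noSpotFiles = len(listDozorSpotFile)
--     if noSpotFiles > 2:
--         start = 2
--     else:
--         start = 1
--     for index in range(start,noSpotFiles+1):
--         tupleCombination = itertools.combinations(listDozorSpotFile, index)
--         for combination in tupleCombination:
--             listCombination = list(combination)
--             if len(listCombination) > 0:
--                 listPermutation += [listCombination]
--     return listPermutation
-- ===== SOURCE B (Python) =====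
-- def _subsets(xs):
--     # all subsequences of xs, lexicographic by index positions; includes []
--     if not xs:
--         return [[]]
--     rest = _subsets(xs[1:])
--     return [[xs[0]] + s for s in rest] + rest
--
--
-- def getListPermutation(listDozorSpotFile):
--     subs = _subsets(listDozorSpotFile)
--     n = len(listDozorSpotFile)
--     start = 2 if n > 2 else 1
--     listPermutation = []
--     for k in range(start, n + 1):
--         listPermutation += [s for s in subs if len(s) == k]
--     return listPermutation
-- ===== Notes on version B (the rewrite author's own statement) =====
-- stated objective: alternative
-- what changed: B builds the full powerset once with a single structural recursion (include-first-element branch ++ exclude branch) and then selects each size class by a length filter, instead of calling itertools.combinations separately for every size k.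
import Mathlib
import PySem

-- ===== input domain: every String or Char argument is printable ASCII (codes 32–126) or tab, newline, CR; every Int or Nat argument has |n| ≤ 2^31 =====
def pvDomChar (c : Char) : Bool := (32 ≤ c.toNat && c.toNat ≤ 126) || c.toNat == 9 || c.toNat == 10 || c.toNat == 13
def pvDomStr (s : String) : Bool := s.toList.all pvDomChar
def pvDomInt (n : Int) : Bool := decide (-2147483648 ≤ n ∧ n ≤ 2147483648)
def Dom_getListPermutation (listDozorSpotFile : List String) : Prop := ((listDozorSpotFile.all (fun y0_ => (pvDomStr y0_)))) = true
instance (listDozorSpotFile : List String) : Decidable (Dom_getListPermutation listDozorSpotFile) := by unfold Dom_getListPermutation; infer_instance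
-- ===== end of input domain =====

-- B replaces the per-size itertools.combinations calls by one recursive powerset pass plus a length filter per size; same value, no speed claim.

-- ===== PORT A =====
-- port of itertools.combinations(l, k) (library call ported as the canonical recursive
-- combinations function, lexicographic by position, matching itertools' order);
-- for k < 0 it returns [] (never reached: the loop uses k ≥ 1)
def combA (l : List String) (k : Int) : List (List String) :=
  if k = 0 then [[]]
  else match l with
    | [] => []
    | x :: xs => ((combA xs (k - 1)).map (fun c => x :: c)) ++ combA xs k

def getListPermutation (listDozorSpotFile : List String) : List (List String) :=
  let noSpotFiles : Int := listDozorSpotFile.length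
  let start : Int := if noSpotFiles > 2 then 2 else 1
  (PySem.List.pyRange start (noSpotFiles + 1) 1).foldl
    (fun listPermutation index =>
      (combA listDozorSpotFile index).foldl
        (fun acc listCombination =>
          if listCombination.length > 0 then acc ++ [listCombination] else acc)
        listPermutation)
    []

-- ===== PORT B =====
def subsetsB (xs : List String) : List (List String) :=
  match xs with
  | [] => [[]]
  | x :: rest => ((subsetsB rest).map (fun s => x :: s)) ++ subsetsB rest

def getListPermutation_alt (listDozorSpotFile : List String) : List (List String) :=
  let subs := subsetsB listDozorSpotFile
  let n : Int := listDozorSpotFile.length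
  let start : Int := if n > 2 then 2 else 1
  (PySem.List.pyRange start (n + 1) 1).foldl
    (fun listPermutation k =>
      listPermutation ++ subs.filter (fun s => (s.length : Int) == k))
    []

-- ===== PRECONDITION & SPEC =====
def Spec_getListPermutation (listDozorSpotFile : List String) (out : List (List String)) : Prop := out = getListPermutation_alt listDozorSpotFile
instance (listDozorSpotFile : List String) (out : List (List String)) : Decidable (Spec_getListPermutation listDozorSpotFile out) := by unfold Spec_getListPermutation; infer_instance

-- ===== CLAIM (what is proved, stated in full; the proofs are below) =====
def Claim_equal_getListPermutation : Prop := ∀ (listDozorSpotFile : List String), Dom_getListPermutation listDozorSpotFile → Spec_getListPermutation listDozorSpotFile (getListPermutation listDozorSpotFile)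

-- ===== LEMMAS AND PROOFS =====

theorem beq_shift (m : Nat) (k : Int) : (((m + 1 : Nat) : Int) == k) = ((m : Int) == k - 1) := by
  by_cases h : (m : Int) = k - 1
  · simp [h, show ((m + 1 : Nat) : Int) = k by omega]
  · simp [h]; omega

theorem combA_len (l : List String) (k : Int) :
    ∀ s ∈ combA l k, (s.length : Int) = k := by
  induction l generalizing k with
  | nil =>
      intro s hs
      by_cases h : k = 0 <;> simp [combA, h] at hs
      simp [hs, h]
  | cons x xs ih =>
      intro s hs
      by_cases h : k = 0
      · simp [combA, h] at hs; simp [hs, h]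
      · simp only [combA, if_neg h, List.mem_append, List.mem_map] at hs
        rcases hs with ⟨c, hc, rfl⟩ | hs
        · have := ih (k - 1) c hc; simp; omega
        · exact ih k s hs

-- the size-k slice of the powerset is exactly combinations of size k, in the same order
theorem filter_subsetsB (l : List String) (k : Int) :
    (subsetsB l).filter (fun s => (s.length : Int) == k) = combA l k := by
  induction l generalizing k with
  | nil =>
      by_cases h : k = 0 <;> simp [subsetsB, combA, h]
      omega
  | cons x xs ih =>
      by_cases h : k = 0
      · subst h
        have h1 : (subsetsB xs).filter (fun s => ((s.length + 1 : Nat) : Int) == 0) = [] := by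
          apply List.filter_eq_nil_iff.mpr
          intro s _; simp; omega
        calc (subsetsB (x :: xs)).filter (fun s => (s.length : Int) == 0)
            = ((subsetsB xs).map (fun s => x :: s) ++ subsetsB xs).filter
                (fun s => (s.length : Int) == 0) := rfl
          _ = [[]] := by
              rw [List.filter_append, List.filter_map]
              simp only [Function.comp_def, List.length_cons]
              rw [h1, ih 0]
              cases xs <;> simp [combA]
      · calc (subsetsB (x :: xs)).filter (fun s => (s.length : Int) == k)
            = ((subsetsB xs).map (fun s => x :: s) ++ subsetsB xs).filter
                (fun s => (s.length : Int) == k) := rfl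
          _ = ((subsetsB xs).filter (fun s => (s.length : Int) == k - 1)).map (fun s => x :: s)
                ++ (subsetsB xs).filter (fun s => (s.length : Int) == k) := by
              rw [List.filter_append, List.filter_map]
              congr 1
              congr 1
              apply List.filter_congr
              intro s _
              simp only [Function.comp_def, List.length_cons]
              exact beq_shift s.length k
          _ = combA (x :: xs) k := by rw [ih (k - 1), ih k]; simp [combA, h]

-- A's inner loop over a block whose members are all non-empty appends the whole block
theorem innerA (L : List (List String)) (hL : ∀ c ∈ L, c.length > 0) :
    ∀ acc : List (List String),
      L.foldl (fun acc c => if c.length > 0 then acc ++ [c] else acc) acc = acc ++ L := by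
  induction L with
  | nil => intro acc; simp
  | cons c cs ih =>
      intro acc
      have hc : c.length > 0 := hL c List.mem_cons_self
      simp only [List.foldl_cons, if_pos hc]
      rw [ih (fun d hd => hL d (List.mem_cons_of_mem c hd))]
      simp

theorem combA_pos_len (l : List String) (k : Int) (hk : 1 ≤ k) :
    ∀ c ∈ combA l k, c.length > 0 := by
  intro c hc
  have := combA_len l k c hc
  omega

theorem outer (l : List String) (R : List Int) (hR : ∀ k ∈ R, 1 ≤ k) :
    ∀ acc : List (List String),
      R.foldl
        (fun listPermutation index =>
          (combA l index).foldl
            (fun acc listCombination =>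
              if listCombination.length > 0 then acc ++ [listCombination] else acc)
            listPermutation)
        acc
      = R.foldl
          (fun listPermutation k =>
            listPermutation ++ (subsetsB l).filter (fun s => (s.length : Int) == k))
          acc := by
  induction R with
  | nil => intro acc; rfl
  | cons k R ih =>
      intro acc
      have hk : 1 ≤ k := hR k List.mem_cons_self
      simp only [List.foldl_cons]
      rw [innerA (combA l k) (combA_pos_len l k hk) acc, filter_subsetsB l k]
      exact ih (fun j hj => hR j (List.mem_cons_of_mem k hj)) _

-- ===== VERDICT (by name: the statement is the Claim_ definition above) =====
theorem getListPermutation_spec : Claim_equal_getListPermutation := by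
  intro l _
  unfold Spec_getListPermutation getListPermutation getListPermutation_alt
  simp only []
  apply outer
  intro k hk
  rw [PySem.List.mem_pyRange_one] at hk
  split_ifs at hk <;> omega
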